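-- pv_equiv track=rewrite | github.com/Pi3dra/OptiGraphes | moneyprinter.py | generate_chains
-- ===== SOURCE A (Python) =====
-- ALPHABET = ("0", "1", "2", "3")
--
-- def generate_chains(p):
--     """
--     Génère toutes les chaînes de longueur p:
--       - commencent par 'E' et finissent par 'E'
--       - sans deux caractères identiques consécutifs
--     Retourne un générateur (itérer pour parcourir sans tout stocker).
--     """
--     if p < 2:
--         return
--     if p == 2:
--         return
--     if p == 3:
--         for mid in ("1", "2", "3"):
--             yield "0" + mid + "0"
--         return
--
--     def backtrack(prefix):
--         i = len(prefix) # index 0..(p-1)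
--         if i == p:
--             yield "".join(prefix)
--             return
--
--         if i == 0:
--             choices = ("0",)
--         elif i == p-1:
--             choices = ("0",)
--         else:
--             prev = prefix[-1]
--             choices = (c for c in ALPHABET if c != prev)
--
--         for c in choices:
--             if i > 0 and c == prefix[-1]:
--                 continue
--             prefix.append(c)
--             yield from backtrack(prefix)
--             prefix.pop()
--
--     yield from backtrack(prefix=[])
-- ===== SOURCE B (Python) =====
-- ALPHABET = ("0", "1", "2", "3")
--
-- def generate_chains(p):
--     if p < 2:
--         return
--     # breadth-first: all valid prefixes of each length, built level by level
--     level = ["0"]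
--     for _ in range(p - 2):
--         level = [s + c for s in level for c in ALPHABET if c != s[-1]]
--     for s in level:
--         if s[-1] != "0":
--             yield s + "0"
-- ===== Notes on version B (the rewrite author's own statement) =====
-- stated objective: alternative
-- what changed: A's recursive pruned backtracking DFS over a mutable prefix (a generator yielding one string per leaf) is replaced by an iterative breadth-first build: one list comprehension per position extends the whole level of valid prefixes at once, then a final pass closes each with '0'.
import Mathlib
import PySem

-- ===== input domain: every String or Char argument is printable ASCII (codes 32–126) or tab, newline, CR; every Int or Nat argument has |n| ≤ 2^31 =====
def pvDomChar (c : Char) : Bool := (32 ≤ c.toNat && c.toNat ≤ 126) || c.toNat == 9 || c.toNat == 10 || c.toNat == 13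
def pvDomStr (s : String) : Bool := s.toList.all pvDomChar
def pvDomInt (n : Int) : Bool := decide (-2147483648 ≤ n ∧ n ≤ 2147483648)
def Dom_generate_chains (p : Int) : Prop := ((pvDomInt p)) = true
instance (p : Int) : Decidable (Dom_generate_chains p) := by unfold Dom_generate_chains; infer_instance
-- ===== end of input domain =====

-- B replaces A's recursive pruned DFS over a mutable prefix with an iterative breadth-first
-- build: one list of all valid prefixes per position, extended level by level (alternative
-- decomposition; a timing run measures which is faster).

-- ===== PORT A =====
-- A's inner 'backtrack' generator as a list; 'fuel' only makes the recursion total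
-- (the i == p check fires before A's fuel runs out on its actual calls).
def gcA_backtrack (p : Int) (pre : List Char) (fuel : Nat) : List String :=
  let i : Int := pre.length
  if i = p then [String.ofList pre]
  else
    match fuel with
    | 0 => []   -- unreachable on A's actual calls
    | f + 1 =>
      let choices : List Char :=
        if i = 0 then ['0']
        else if i = p - 1 then ['0']
        else
          match pre.getLast? with
          | some prev => ['0', '1', '2', '3'].filter (fun c => c ≠ prev)
          | none => []
      choices.foldl
        (fun acc c =>
          if 0 < i ∧ pre.getLast? = some c then acc   -- the 'continue'
          else acc ++ gcA_backtrack p (pre ++ [c]) f)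
        []
termination_by fuel

def generate_chains (p : Int) : List String :=
  if p < 2 then []
  else if p = 2 then []
  else if p = 3 then
    ["1", "2", "3"].foldl (fun acc mid => acc ++ ["0" ++ mid ++ "0"]) []
  else gcA_backtrack p [] p.toNat

-- ===== PORT B =====
-- strings carried as List Char; s[-1] on the always-nonempty prefix is getLast?
-- one level step: [s + c for s in level for c in ALPHABET if c != s[-1]]
def gcB_ext (level : List (List Char)) : List (List Char) :=
  level.flatMap (fun s =>
    (['0', '1', '2', '3'].filter (fun c => some c ≠ s.getLast?)).map (fun c => s ++ [c]))

def generate_chains_alt (p : Int) : List String :=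
  if p < 2 then []
  else
    let level := (List.range (p - 2).toNat).foldl (fun lv _ => gcB_ext lv) [['0']]
    (level.filter (fun s => s.getLast? ≠ some '0')).map
      (fun s => String.ofList (s ++ ['0']))

-- ===== PRECONDITION & SPEC =====
-- Pre_'s bound sits just under CPython's default recursion limit: beyond it consuming A's
-- generator raises RecursionError (A recurses one frame per character, and the caller's own
-- frames use part of the limit); inside Pre_ A raises nothing.
def Pre_generate_chains (p : Int) : Prop := p ≤ 980
instance (p : Int) : Decidable (Pre_generate_chains p) := by unfold Pre_generate_chains; infer_instance
def pvWitness_generate_chains : Int := (5)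

def Spec_generate_chains (p : Int) (out : List String) : Prop := out = generate_chains_alt p
instance (p : Int) (out : List String) : Decidable (Spec_generate_chains p out) := by unfold Spec_generate_chains; infer_instance

-- ===== CLAIM (what is proved, stated in full; the proofs are below) =====
def Claim_equal_generate_chains : Prop := ∀ (p : Int), Dom_generate_chains p → Pre_generate_chains p → Spec_generate_chains p (generate_chains p)

-- ===== LEMMAS AND PROOFS =====

-- k-fold application of the level step
def gcB_iter : Nat → List (List Char) → List (List Char)
  | 0, l => l
  | k + 1, l => gcB_iter k (gcB_ext l)

lemma gcB_iter_append (k : Nat) : ∀ (l₁ l₂ : List (List Char)),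
    gcB_iter k (l₁ ++ l₂) = gcB_iter k l₁ ++ gcB_iter k l₂ := by
  induction k with
  | zero => intro l₁ l₂; rfl
  | succ k ih =>
    intro l₁ l₂
    show gcB_iter k (gcB_ext (l₁ ++ l₂)) = _
    rw [show gcB_ext (l₁ ++ l₂) = gcB_ext l₁ ++ gcB_ext l₂ from List.flatMap_append .., ih]
    rfl

lemma gcB_iter_nil (k : Nat) : gcB_iter k [] = [] := by
  induction k with
  | zero => rfl
  | succ k ih => exact ih

lemma gcB_iter_eq_flatMap (k : Nat) (xs : List (List Char)) :
    gcB_iter k xs = xs.flatMap (fun s => gcB_iter k [s]) := by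
  induction xs with
  | nil => simp [gcB_iter_nil]
  | cons x t ih =>
    rw [show x :: t = [x] ++ t from rfl, gcB_iter_append, ih]
    simp

lemma gc_flatMap_filter {α β : Type} (l : List α) (h : α → List β) (p : β → Bool) :
    (l.flatMap h).filter p = l.flatMap (fun c => (h c).filter p) := by
  induction l with
  | nil => rfl
  | cons x t ih => simp [List.filter_append, ih]

lemma gc_flatMap_map {α β γ : Type} (l : List α) (h : α → List β) (f : β → γ) :
    (l.flatMap h).map f = l.flatMap (fun c => (h c).map f) := by
  induction l with
  | nil => rfl
  | cons x t ih => simp [List.map_append, ih]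

lemma gc_foldl_range (n : Nat) (x : List (List Char)) :
    (List.range n).foldl (fun lv _ => gcB_ext lv) x = gcB_iter n x := by
  induction n generalizing x with
  | zero => rfl
  | succ n ih =>
    rw [List.range_succ_eq_map, List.foldl_cons, List.foldl_map, ih]
    rfl

-- A's DFS from a non-empty prefix with k interior slots left = B's BFS from that prefix
lemma backtrack_eq (k : Nat) : ∀ (p : Int) (pre : List Char) (prev : Char) (fuel : Nat),
    pre.getLast? = some prev → (pre.length : Int) + k + 1 = p → k + 1 ≤ fuel →
    gcA_backtrack p pre fuel =
      ((gcB_iter k [pre]).filter (fun s => s.getLast? ≠ some '0')).map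
        (fun s => String.ofList (s ++ ['0'])) := by
  induction k with
  | zero =>
    intro p pre prev fuel hlast hlen hfuel
    obtain ⟨f, rfl⟩ : ∃ f, fuel = f + 1 := ⟨fuel - 1, by omega⟩
    have hne : pre ≠ [] := by intro h; simp [h] at hlast
    have hpos : 0 < pre.length := List.length_pos_iff.mpr hne
    rw [gcA_backtrack]
    simp only
    rw [if_neg (by omega), if_neg (by exact_mod_cast (by omega : (pre.length : Int) ≠ 0)),
      if_pos (by omega)]
    by_cases hp : prev = '0'
    · subst hp
      rw [List.foldl_cons, if_pos ⟨by exact_mod_cast hpos, hlast⟩]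
      simp [gcB_iter, hlast]
    · rw [List.foldl_cons,
        if_neg (by rintro ⟨-, h⟩; rw [hlast] at h; exact hp (Option.some_inj.mp h))]
      rw [List.foldl_nil, List.nil_append, gcA_backtrack.eq_def]
      simp only
      rw [if_pos (by simp; omega)]
      simp [gcB_iter, hlast, hp]
  | succ k ih =>
    intro p pre prev fuel hlast hlen hfuel
    obtain ⟨f, rfl⟩ : ∃ f, fuel = f + 1 := ⟨fuel - 1, by omega⟩
    have hne : pre ≠ [] := by intro h; simp [h] at hlast
    have hpos : 0 < pre.length := List.length_pos_iff.mpr hne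
    rw [gcA_backtrack]
    simp only
    rw [if_neg (by omega), if_neg (by exact_mod_cast (by omega : (pre.length : Int) ≠ 0)),
      if_neg (by omega), hlast]
    simp only
    rw [show (List.foldl (fun acc c => if 0 < (pre.length : Int) ∧ some prev = some c then acc
            else acc ++ gcA_backtrack p (pre ++ [c]) f)
          [] (List.filter (fun c => decide (c ≠ prev)) ['0', '1', '2', '3']))
        = (List.foldl (fun acc c => acc ++ (if 0 < (pre.length : Int) ∧ some prev = some c
            then ([] : List String) else gcA_backtrack p (pre ++ [c]) f))
          [] (List.filter (fun c => decide (c ≠ prev)) ['0', '1', '2', '3']))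
      from PySem.List.foldl_congr_mem _ _ _ _
        (by intro acc c _
            by_cases hx : 0 < (pre.length : Int) ∧ some prev = some c
            · rw [if_pos hx, if_pos hx, List.append_nil]
            · rw [if_neg hx, if_neg hx])]
    rw [PySem.List.foldl_append_eq_flatMap, List.nil_append]
    -- RHS: one BFS step then k more
    rw [show gcB_iter (k + 1) [pre] = gcB_iter k (gcB_ext [pre]) from rfl]
    rw [show gcB_ext [pre]
        = (['0', '1', '2', '3'].filter (fun c => some c ≠ pre.getLast?)).map
            (fun c => pre ++ [c]) from by simp [gcB_ext]]
    rw [hlast]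
    rw [show (List.filter (fun c => decide (some c ≠ some prev)) ['0', '1', '2', '3'])
        = (List.filter (fun c => decide (c ≠ prev)) ['0', '1', '2', '3']) from by
      apply List.filter_congr; intro c _; simp]
    rw [gcB_iter_eq_flatMap, List.flatMap_map, gc_flatMap_filter, gc_flatMap_map]
    apply List.flatMap_congr
    intro c hc
    have hcp : c ≠ prev := by
      have := List.of_mem_filter hc; simpa using this
    rw [if_neg (by rintro ⟨-, h⟩; exact hcp (Option.some_inj.mp h).symm)]
    exact ih p (pre ++ [c]) c f List.getLast?_concat (by simp; omega) (by omega)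

-- ===== VERDICT (by name: the statement is the Claim_ definition above) =====
theorem generate_chains_spec : Claim_equal_generate_chains := by
  intro p _ _
  show generate_chains p = generate_chains_alt p
  by_cases h1 : p < 2
  · simp [generate_chains, generate_chains_alt, h1]
  · by_cases h2 : p = 2
    · subst h2; decide
    · by_cases h3 : p = 3
      · subst h3; decide
      · have h4 : 4 ≤ p := by omega
        rw [generate_chains, if_neg h1, if_neg h2, if_neg h3,
          generate_chains_alt, if_neg h1]
        obtain ⟨m, hm⟩ : ∃ m : Nat, p.toNat = m + 1 := ⟨p.toNat - 1, by omega⟩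
        rw [hm, gcA_backtrack]
        simp only [List.length_nil]
        rw [if_neg (by omega), if_pos (by norm_num), List.foldl_cons,
          if_neg (by rintro ⟨h, -⟩; omega), List.foldl_nil, List.nil_append, List.nil_append]
        rw [backtrack_eq ((p - 2).toNat) p ['0'] '0' m rfl (by simp; omega) (by omega)]
        rw [gc_foldl_range]
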